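-- pv_equiv track=rewrite | github.com/KaimingTao/Toolkit-list | build-genbank-query/main.py | parse_source_feature
-- ===== SOURCE A (Python) =====
-- def parse_qualifier_value(raw_value: str) -> str:
--     value = raw_value.strip()
--     if value.startswith('"') and value.endswith('"'):
--         return value[1:-1]
--     return value
--
-- def parse_source_feature(record: str) -> dict[str, str]:
--     lines = record.splitlines()
--     in_features = False
--     source_location = ""
--     qualifiers: dict[str, str] = {}
--     current_key: str | None = None
--
--     for line in lines:
--         if line.startswith("FEATURES             Location/Qualifiers"):
--             in_features = True
--             continue
--         if not in_features:
--             continue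
--         if line.startswith("ORIGIN") or line.startswith("BASE COUNT") or line.startswith("CONTIG"):
--             break
--
--         feature_key = line[5:21] if len(line) >= 21 else ""
--         content = line[21:].rstrip() if len(line) > 21 else ""
--
--         if source_location:
--             if feature_key.strip():
--                 break
--             if not content:
--                 continue
--             if content.startswith("/"):
--                 key, _, raw_value = content[1:].partition("=")
--                 qualifiers[key] = parse_qualifier_value(raw_value)
--                 current_key = key
--             elif current_key is not None:
--                 qualifiers[current_key] = f"{qualifiers[current_key]} {parse_qualifier_value(content)}".strip()
--             continue
--
--         if feature_key.strip() == "source":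
--             source_location = content.strip()
--
--     source_data = {"source_location": source_location}
--     for key, value in qualifiers.items():
--         source_data[f"source_{key}"] = value
--     return source_data
-- ===== SOURCE B (Python) =====
-- HEADER = "FEATURES             Location/Qualifiers"
-- TERMINATORS = ("ORIGIN", "BASE COUNT", "CONTIG")
--
--
-- def parse_qualifier_value(raw_value: str) -> str:
--     value = raw_value.strip()
--     if value.startswith('"') and value.endswith('"'):
--         return value[1:-1]
--     return value
--
--
-- def _columns(line):
--     key = line[5:21] if len(line) >= 21 else ""
--     content = line[21:].rstrip() if len(line) > 21 else ""
--     return key, content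
--
--
-- def _after_header(lines):
--     for idx, line in enumerate(lines):
--         if line.startswith(HEADER):
--             return lines[idx + 1:]
--     return []
--
--
-- def _find_source(lines):
--     for idx, line in enumerate(lines):
--         if line.startswith(HEADER):
--             continue
--         if line.startswith(TERMINATORS):
--             return "", []
--         key, content = _columns(line)
--         if key.strip() == "source":
--             location = content.strip()
--             if location:
--                 return location, lines[idx + 1:]
--     return "", []
--
--
-- def _source_block(lines):
--     block = []
--     for line in lines:
--         if line.startswith(HEADER):
--             continue
--         if line.startswith(TERMINATORS):
--             break
--         key, content = _columns(line)
--         if key.strip():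
--             break
--         if content:
--             block.append(content)
--     return block
--
--
-- def _group_entries(block):
--     entries = []
--     current = None
--     for content in block:
--         if content.startswith("/"):
--             if current is not None:
--                 entries.append(current)
--             key, _, raw = content[1:].partition("=")
--             current = (key, parse_qualifier_value(raw))
--         elif current is not None:
--             current = (current[0], f"{current[1]} {parse_qualifier_value(content)}".strip())
--     if current is not None:
--         entries.append(current)
--     return entries
--
--
-- def parse_source_feature(record: str) -> dict:
--     lines = _after_header(record.splitlines())
--     location, rest = _find_source(lines)
--     result = {"source_location": location}
--     for key, value in _group_entries(_source_block(rest)):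
--         result[f"source_{key}"] = value
--     return result
-- ===== Notes on version B (the rewrite author's own statement) =====
-- stated objective: alternative
-- what changed: A's single state-machine loop (in_features/source_location/current_key flags with dict writes per physical line) is replaced by separate passes: drop lines up to the FEATURES header, scan for the source feature line, collect the contiguous block of its content lines, group physical lines into logical (key, value) qualifier entries, and only then build the result dict.
import Mathlib
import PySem

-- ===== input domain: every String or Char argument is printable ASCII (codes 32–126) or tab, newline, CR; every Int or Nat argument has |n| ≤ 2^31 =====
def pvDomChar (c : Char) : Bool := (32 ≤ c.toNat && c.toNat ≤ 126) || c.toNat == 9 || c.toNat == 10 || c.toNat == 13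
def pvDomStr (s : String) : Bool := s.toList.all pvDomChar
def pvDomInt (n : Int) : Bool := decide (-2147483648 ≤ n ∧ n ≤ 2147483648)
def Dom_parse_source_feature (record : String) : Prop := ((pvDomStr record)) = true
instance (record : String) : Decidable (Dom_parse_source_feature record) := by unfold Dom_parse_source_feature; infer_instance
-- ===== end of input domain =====

-- B re-implements the parse in separate passes (find header / find source line / collect block / group
-- entries) instead of A's single state-machine loop; objective: simpler decomposition, same cost.

-- shared module-level constants and helpers (both Pythons use the same literals and parse_qualifier_value)
def pvHeaderC : List Char := "FEATURES             Location/Qualifiers".toList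

def pvTermin (line : List Char) : Bool :=
  PySem.Chars.startswith line "ORIGIN".toList || PySem.Chars.startswith line "BASE COUNT".toList ||
    PySem.Chars.startswith line "CONTIG".toList

-- parse_qualifier_value (shared helper in the module)
def pqvC (raw : List Char) : List Char :=
  let v := PySem.Chars.strip raw
  if PySem.Chars.startswith v ['"'] && PySem.Chars.endswith v ['"'] then
    PySem.Chars.slice v (some 1) (some (-1))
  else v

-- hand port of str.partition("="): exact — (text before the first '=', text after); (s, "") when '=' is absent
def partEq : List Char → List Char × List Char
  | [] => ([], [])
  | c :: rest =>
    if c == '=' then ([], rest)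
    else
      let p := partEq rest
      (c :: p.1, p.2)

-- ===== PORT A =====
-- A's single for-loop with state (in_features, source_location, qualifiers, current_key); 'break' returns.
-- qualifiers[current_key] is read with getD [] — the key is always present when A reads it (no KeyError).
def loopA : List (List Char) → Bool → List Char → PySem.Dict (List Char) (List Char) →
    Option (List Char) → List Char × PySem.Dict (List Char) (List Char)
  | [], _, loc, quals, _ => (loc, quals)
  | line :: rest, inf, loc, quals, ck =>
    if PySem.Chars.startswith line pvHeaderC then loopA rest true loc quals ck
    else if !inf then loopA rest inf loc quals ck
    else if pvTermin line then (loc, quals)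
    else
      let fk := if 21 ≤ line.length then PySem.Chars.slice line (some 5) (some 21) else []
      let content := if 21 < line.length then PySem.Chars.rstrip (PySem.Chars.slice line (some 21) none) else []
      if loc ≠ [] then
        if PySem.Chars.strip fk ≠ [] then (loc, quals)
        else if content = [] then loopA rest inf loc quals ck
        else if PySem.Chars.startswith content ['/'] then
          let p := partEq (PySem.Chars.slice content (some 1) none)
          loopA rest inf loc (quals.insert p.1 (pqvC p.2)) (some p.1)
        else
          match ck with
          | some k =>
            loopA rest inf loc (quals.insert k (PySem.Chars.strip (quals.getD k [] ++ ' ' :: pqvC content))) ck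
          | none => loopA rest inf loc quals ck
      else
        if PySem.Chars.strip fk == "source".toList then loopA rest inf (PySem.Chars.strip content) quals ck
        else loopA rest inf loc quals ck

def parse_source_feature (record : String) : List (String × String) :=
  let lines := (PySem.Str.splitlines record).map String.toList
  let r := loopA lines false [] PySem.Dict.empty none
  let d0 := PySem.Dict.empty.insert "source_location".toList r.1
  let final := r.2.items.foldl (fun d p => d.insert ("source_".toList ++ p.1) p.2) d0
  final.items.map (fun p => (String.ofList p.1, String.ofList p.2))

-- ===== PORT B =====
-- B: four passes — drop up to the FEATURES header, find the source line, collect the block's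
-- content lines, group them into (key, value) entries — then build the result dict.
def colKeyB (line : List Char) : List Char :=
  if 21 ≤ line.length then PySem.Chars.slice line (some 5) (some 21) else []

def colContentB (line : List Char) : List Char :=
  if 21 < line.length then PySem.Chars.rstrip (PySem.Chars.slice line (some 21) none) else []

def afterHeaderB : List (List Char) → List (List Char)
  | [] => []
  | line :: rest => if PySem.Chars.startswith line pvHeaderC then rest else afterHeaderB rest

def findSourceB : List (List Char) → List Char × List (List Char)
  | [] => ([], [])
  | line :: rest =>
    if PySem.Chars.startswith line pvHeaderC then findSourceB rest
    else if pvTermin line then ([], [])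
    else if PySem.Chars.strip (colKeyB line) == "source".toList then
      let loc := PySem.Chars.strip (colContentB line)
      if loc ≠ [] then (loc, rest) else findSourceB rest
    else findSourceB rest

def sourceBlockB : List (List Char) → List (List Char)
  | [] => []
  | line :: rest =>
    if PySem.Chars.startswith line pvHeaderC then sourceBlockB rest
    else if pvTermin line then []
    else if PySem.Chars.strip (colKeyB line) ≠ [] then []
    else if colContentB line = [] then sourceBlockB rest
    else colContentB line :: sourceBlockB rest

-- _group_entries: loop over the block with (entries, current) state; flush current at the end
def groupGoB : List (List Char) → List (List Char × List Char) → Option (List Char × List Char) →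
    List (List Char × List Char)
  | [], es, cur => match cur with | some e => es ++ [e] | none => es
  | c :: cs, es, cur =>
    if PySem.Chars.startswith c ['/'] then
      let p := partEq (PySem.Chars.slice c (some 1) none)
      groupGoB cs (match cur with | some e => es ++ [e] | none => es) (some (p.1, pqvC p.2))
    else
      match cur with
      | some e => groupGoB cs es (some (e.1, PySem.Chars.strip (e.2 ++ ' ' :: pqvC c)))
      | none => groupGoB cs es cur

def parse_source_feature_alt (record : String) : List (String × String) :=
  let lines := afterHeaderB ((PySem.Str.splitlines record).map String.toList)
  let r := findSourceB lines
  let entries := groupGoB (sourceBlockB r.2) [] none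
  let result := entries.foldl (fun d p => d.insert ("source_".toList ++ p.1) p.2)
    (PySem.Dict.empty.insert "source_location".toList r.1)
  result.items.map (fun p => (String.ofList p.1, String.ofList p.2))

-- ===== PRECONDITION & SPEC =====
def Spec_parse_source_feature (record : String) (out : List (String × String)) : Prop := out = parse_source_feature_alt record
instance (record : String) (out : List (String × String)) : Decidable (Spec_parse_source_feature record out) := by unfold Spec_parse_source_feature; infer_instance

-- ===== CLAIM (what is proved, stated in full; the proofs are below) =====
def Claim_equal_parse_source_feature : Prop := ∀ (record : String), Dom_parse_source_feature record → Spec_parse_source_feature record (parse_source_feature record)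

-- ===== LEMMAS AND PROOFS =====

-- abbreviation used only by the proofs: fold of Dict.insert over an association list
def insAll (d : PySem.Dict (List Char) (List Char)) (l : List (List Char × List Char)) :
    PySem.Dict (List Char) (List Char) :=
  l.foldl (fun d p => d.insert p.1 p.2) d

theorem loopA_header (lines : List (List Char)) (loc : List Char) (q : PySem.Dict (List Char) (List Char))
    (ck : Option (List Char)) :
    loopA lines false loc q ck = loopA (afterHeaderB lines) true loc q ck := by
  induction lines with
  | nil => rfl
  | cons line rest ih =>
    simp only [loopA, afterHeaderB]
    by_cases h : PySem.Chars.startswith line pvHeaderC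
    · simp [h]
    · simp [h, ih]

set_option maxHeartbeats 3200000 in
theorem loopA_search (lines : List (List Char)) (q : PySem.Dict (List Char) (List Char)) :
    loopA lines true [] q none =
      (if (findSourceB lines).1 = [] then ([], q)
       else loopA (findSourceB lines).2 true (findSourceB lines).1 q none) := by
  induction lines with
  | nil => simp [loopA, findSourceB]
  | cons line rest ih =>
    simp only [loopA, findSourceB, colKeyB, colContentB, Bool.not_true, Bool.false_eq_true, if_false]
    split_ifs with h1 h2 h3 h4 h5 <;>
      first
      | rfl
      | exact ih
      | simp_all

theorem groupGoB_prefix (cs : List (List Char)) (es : List (List Char × List Char))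
    (cur : Option (List Char × List Char)) :
    groupGoB cs es cur = es ++ groupGoB cs [] cur := by
  induction cs generalizing es cur with
  | nil => cases cur <;> simp [groupGoB]
  | cons c cs ih =>
    by_cases h : PySem.Chars.startswith c ['/'] = true
    · cases cur with
      | none => simp only [groupGoB, h, if_pos]; rw [ih]
      | some e =>
        simp only [groupGoB, h, if_pos]
        rw [ih, ih (es := [] ++ [e])]
        simp
    · cases cur with
      | none => simp only [groupGoB, h, Bool.false_eq_true, if_false]; rw [ih]
      | some e => simp only [groupGoB, h, Bool.false_eq_true, if_false]; rw [ih]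

theorem loopA_block (lines : List (List Char)) (loc : List Char) (hloc : loc ≠ []) :
    (∀ q, loopA lines true loc q none = (loc, insAll q (groupGoB (sourceBlockB lines) [] none))) ∧
    (∀ q k v, loopA lines true loc (q.insert k v) (some k) =
      (loc, insAll q (groupGoB (sourceBlockB lines) [] (some (k, v))))) := by
  induction lines with
  | nil =>
    refine ⟨fun q => ?_, fun q k v => ?_⟩ <;> simp [loopA, sourceBlockB, groupGoB, insAll]
  | cons line rest ih =>
    refine ⟨fun q => ?_, fun q k v => ?_⟩ <;>
    · simp only [loopA, sourceBlockB, colKeyB, colContentB, Bool.not_true, Bool.false_eq_true,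
        if_false]
      split_ifs with h1 h2 h3 h4 h5 h6 h7 h8 <;>
        first
        | omega
        | (simp_all; done)
        | exact ih.1 q
        | exact ih.2 q k v
        | (simp [groupGoB, insAll]; done)
        | (simp only [groupGoB]; rw [if_pos h7]; exact ih.2 q _ _)
        | (simp only [groupGoB]; rw [if_neg h7]; exact ih.1 q)
        | (simp only [groupGoB]; rw [if_pos h7, groupGoB_prefix, ih.2 (q.insert k v)]
           simp [insAll])
        | (rw [PySem.Dict.getD_insert_self, PySem.Dict.insert_insert_self]
           simp only [groupGoB]; rw [if_neg h7]; exact ih.2 q k _)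


theorem findSourceB_nil_of_loc_nil (lines : List (List Char)) (h : (findSourceB lines).1 = []) :
    (findSourceB lines).2 = [] := by
  induction lines with
  | nil => rfl
  | cons line rest ih =>
    simp only [findSourceB] at h ⊢
    split_ifs at h ⊢ with h1 h2 h3 h4
    · exact ih h
    · rfl
    · exact absurd h h4
    · exact ih h
    · exact ih h

theorem insert_comm_of_contains (d : PySem.Dict (List Char) (List Char)) (k1 k2 v1 v2 : List Char)
    (hne : ¬ k2 = k1) (hk : d.contains k1 = true) :
    (d.insert k2 v2).insert k1 v1 = (d.insert k1 v1).insert k2 v2 := by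
  apply PySem.Dict.ext
  have hc1 : (d.insert k2 v2).contains k1 = true := by
    rw [PySem.Dict.contains_insert]; simp [hk]
  by_cases hk2 : d.contains k2 = true
  · have hc2 : (d.insert k1 v1).contains k2 = true := by
      rw [PySem.Dict.contains_insert]; simp [hk2]
    rw [PySem.Dict.items_insert_of_contains _ _ hc1, PySem.Dict.items_insert_of_contains _ _ hk2,
      PySem.Dict.items_insert_of_contains _ _ hc2, PySem.Dict.items_insert_of_contains _ _ hk]
    rw [List.map_map, List.map_map]
    apply List.map_congr_left
    intro p _
    by_cases e1 : p.1 = k1 <;> by_cases e2 : p.1 = k2 <;>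
      simp [Function.comp, e1, e2, hne] <;> simp_all
  · have hc2 : (d.insert k1 v1).contains k2 = false := by
      rw [PySem.Dict.contains_insert]
      simp [hk2, hne]
    rw [PySem.Dict.items_insert_of_contains _ _ hc1,
      PySem.Dict.items_insert_of_not_contains _ _ (by simp [hk2]),
      PySem.Dict.items_insert_of_not_contains _ _ hc2,
      PySem.Dict.items_insert_of_contains _ _ hk]
    rw [List.map_append]
    simp [hne]

theorem insAll_insert_of_fresh (t : List (List Char × List Char))
    (d : PySem.Dict (List Char) (List Char)) (k v : List Char)
    (hfresh : ∀ p ∈ t, ¬ p.1 = k) (hk : d.contains k = true) :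
    (insAll d t).insert k v = insAll (d.insert k v) t := by
  induction t generalizing d with
  | nil => rfl
  | cons p t ih =>
    simp only [insAll, List.foldl_cons] at *
    rw [ih (d.insert p.1 p.2) (fun q hq => hfresh q (List.mem_cons_of_mem _ hq))
        (by rw [PySem.Dict.contains_insert]; simp [hk])]
    rw [insert_comm_of_contains _ _ _ _ _ (hfresh p (List.mem_cons_self)) hk]

theorem insAll_overwrite (l : List (List Char × List Char))
    (d : PySem.Dict (List Char) (List Char)) (k v : List Char)
    (hnd : (l.map Prod.fst).Nodup) (hmem : k ∈ l.map Prod.fst) :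
    insAll d (l.map (fun p => if p.1 == k then (k, v) else p)) = (insAll d l).insert k v := by
  induction l generalizing d with
  | nil => simp at hmem
  | cons p t ih =>
    simp only [List.map_cons, List.nodup_cons, List.mem_cons] at hnd hmem
    by_cases e : p.1 = k
    · subst e
      have htail : ∀ q ∈ t, ¬ q.1 = p.1 := fun q hq hqk =>
        hnd.1 (hqk ▸ List.mem_map_of_mem (f := Prod.fst) hq)
      have hmap : t.map (fun q => if q.1 == p.1 then (p.1, v) else q) = t := by
        rw [List.map_congr_left (g := id) (fun q hq => by simp [htail q hq]), List.map_id]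
      simp only [List.map_cons, beq_self_eq_true, if_pos, hmap]
      show insAll (d.insert p.1 v) t = (insAll (d.insert p.1 p.2) t).insert p.1 v
      rw [insAll_insert_of_fresh t (d.insert p.1 p.2) p.1 v htail
          (by rw [PySem.Dict.contains_insert]; simp),
        PySem.Dict.insert_insert_self]
    · have hm : k ∈ t.map Prod.fst := by
        rcases hmem with h | h
        · exact absurd h.symm e
        · exact h
      simp only [List.map_cons]
      rw [show (p.1 == k) = false from by simp [e]]
      simp only [Bool.false_eq_true, if_false]
      show insAll (d.insert p.1 p.2) (t.map _) = (insAll (d.insert p.1 p.2) t).insert k v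
      exact ih (d.insert p.1 p.2) hnd.2 hm

-- the key map used when building the result dict ('source_' + key)
theorem mapF_overwrite (l : List (List Char × List Char)) (k v : List Char) :
    (l.map (fun p => if p.1 == k then (k, v) else p)).map
        (fun p => ("source_".toList ++ p.1, p.2)) =
      (l.map (fun p => ("source_".toList ++ p.1, p.2))).map
        (fun p => if p.1 == "source_".toList ++ k then ("source_".toList ++ k, v) else p) := by
  rw [List.map_map, List.map_map]
  apply List.map_congr_left
  intro p _
  by_cases e : p.1 = k
  · simp [Function.comp, e]
  · simp [Function.comp, e]

theorem insAll_step (c : PySem.Dict (List Char) (List Char)) (d0 : PySem.Dict (List Char) (List Char))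
    (k v : List Char) (hnd : c.keys.Nodup) :
    insAll d0 ((c.insert k v).items.map (fun p => ("source_".toList ++ p.1, p.2))) =
      (insAll d0 (c.items.map (fun p => ("source_".toList ++ p.1, p.2)))).insert
        ("source_".toList ++ k) v := by
  by_cases hk : c.contains k = true
  · rw [PySem.Dict.items_insert_of_contains _ _ hk, mapF_overwrite]
    apply insAll_overwrite
    · simp only [List.map_map]
      have h1 : ((fun p => Prod.fst p) ∘ fun p : List Char × List Char =>
          ("source_".toList ++ p.1, p.2)) =
          ((fun k => "source_".toList ++ k) ∘ Prod.fst) := rfl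
      rw [h1, ← List.map_map]
      exact List.Nodup.map (fun a b hab => List.append_cancel_left hab) hnd
    · have : k ∈ c.keys := (PySem.Dict.contains_iff_mem_keys c k).mp hk
      have hk' : k ∈ c.items.map Prod.fst := this
      rw [List.map_map]
      exact List.mem_map.mpr ⟨_, List.mem_map.mp hk' |>.choose_spec.1, by
        have := (List.mem_map.mp hk').choose_spec.2
        simp [Function.comp, this]⟩
  · rw [PySem.Dict.items_insert_of_not_contains _ _ (by simp [hk]), List.map_append]
    simp [insAll, List.foldl_append]

theorem insAll_collapse_gen (es : List (List Char × List Char))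
    (c d0 : PySem.Dict (List Char) (List Char)) (hnd : c.keys.Nodup) :
    insAll d0 ((insAll c es).items.map (fun p => ("source_".toList ++ p.1, p.2))) =
      insAll (insAll d0 (c.items.map (fun p => ("source_".toList ++ p.1, p.2))))
        (es.map (fun p => ("source_".toList ++ p.1, p.2))) := by
  induction es generalizing c with
  | nil => rfl
  | cons e t ih =>
    simp only [insAll, List.foldl_cons, List.map_cons] at *
    rw [ih (c.insert e.1 e.2) (PySem.Dict.nodup_keys_insert c e.1 e.2 hnd)]
    rw [show (List.foldl (fun d p => d.insert p.1 p.2) d0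
        ((c.insert e.1 e.2).items.map fun p => ("source_".toList ++ p.1, p.2))) =
      insAll d0 ((c.insert e.1 e.2).items.map fun p => ("source_".toList ++ p.1, p.2)) from rfl]
    rw [insAll_step c d0 e.1 e.2 hnd]
    rfl

theorem insAll_collapse (es : List (List Char × List Char)) (d0 : PySem.Dict (List Char) (List Char)) :
    insAll d0 ((insAll PySem.Dict.empty es).items.map (fun p => ("source_".toList ++ p.1, p.2))) =
      insAll d0 (es.map (fun p => ("source_".toList ++ p.1, p.2))) := by
  rw [insAll_collapse_gen es PySem.Dict.empty d0 (by exact PySem.Dict.nodup_keys_empty)]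
  rfl

theorem foldl_prefix_insert (X : List (List Char × List Char))
    (d0 : PySem.Dict (List Char) (List Char)) :
    X.foldl (fun d p => d.insert ("source_".toList ++ p.1) p.2) d0 =
      insAll d0 (X.map (fun p => ("source_".toList ++ p.1, p.2))) := by
  rw [insAll, List.foldl_map]

-- ===== VERDICT (by name: the statement is the Claim_ definition above) =====
theorem parse_source_feature_spec : Claim_equal_parse_source_feature := by
  unfold Claim_equal_parse_source_feature
  intro record _
  unfold Spec_parse_source_feature parse_source_feature parse_source_feature_alt
  dsimp only
  rw [loopA_header, loopA_search]
  by_cases h : (findSourceB (afterHeaderB ((PySem.Str.splitlines record).map String.toList))).1 = []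
  · rw [if_pos h, findSourceB_nil_of_loc_nil _ h, h]
    rfl
  · rw [if_neg h,
      (loopA_block (findSourceB (afterHeaderB ((PySem.Str.splitlines record).map String.toList))).2
        _ h).1 PySem.Dict.empty]
    rw [foldl_prefix_insert, foldl_prefix_insert, insAll_collapse]
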